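-- pv_equiv track=rewrite | github.com/andreipradan/mainframe | backend/clients/ctp.py | extract_terminals
-- ===== SOURCE A (Python) =====
-- class FetchTransitLinesException(Exception):
--     pass
--
-- def extract_terminals(route, separators):
--     if not separators:
--         cj = "Cluj-Napoca"
--         if cj in route:
--             return cj, route.replace(cj, "").split("-")[1]
--         raise FetchTransitLinesException(
--             f"Couldn't extract terminals from route: {route}"
--         )
--
--     try:
--         terminal1, terminal2 = route.split(separators.pop())
--     except ValueError:
--         return extract_terminals(route, separators)
--
--     return terminal1, terminal2
-- ===== SOURCE B (Python) =====
-- class FetchTransitLinesException(Exception):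
--     pass
--
-- def extract_terminals(route, separators):
--     # Iterative rewrite: pop separators from the end in a while loop (same
--     # in-place mutation as the original's recursion), test the split by its
--     # length instead of try/except unpacking, then the same fallback.
--     while separators:
--         sep = separators.pop()
--         if not sep:
--             continue  # an empty separator can never split (A skips it via ValueError)
--         parts = route.split(sep)
--         if len(parts) == 2:
--             return parts[0], parts[1]
--     cj = "Cluj-Napoca"
--     if cj in route:
--         return cj, route.replace(cj, "").split("-")[1]
--     raise FetchTransitLinesException(
--         f"Couldn't extract terminals from route: {route}"
--     )
-- ===== Notes on version B (the rewrite author's own statement) =====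
-- stated objective: simpler
-- what changed: Replaces the self-recursion and try/except-unpack control flow with a flat while-pop loop that tests the split by its length, keeping the same end-to-start separator order, in-place mutation of separators and exception paths.
import Mathlib
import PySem

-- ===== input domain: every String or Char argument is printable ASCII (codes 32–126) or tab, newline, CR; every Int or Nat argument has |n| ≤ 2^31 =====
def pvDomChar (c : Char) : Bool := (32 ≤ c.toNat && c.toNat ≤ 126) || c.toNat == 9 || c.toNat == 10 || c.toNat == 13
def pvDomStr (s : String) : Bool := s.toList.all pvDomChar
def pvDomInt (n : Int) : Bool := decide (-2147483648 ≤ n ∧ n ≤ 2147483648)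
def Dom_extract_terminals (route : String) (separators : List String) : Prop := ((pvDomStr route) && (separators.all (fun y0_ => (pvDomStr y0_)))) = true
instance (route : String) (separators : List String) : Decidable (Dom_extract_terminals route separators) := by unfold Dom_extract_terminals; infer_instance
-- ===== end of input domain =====

-- B replaces A's self-recursion + try/except unpacking with a flat while-pop loop that tests the
-- split by its length; same end-to-start separator order, same in-place mutation of `separators`
-- (the equivalence proved here is about the RETURN value only) and the same exception paths.

-- ===== PORT A =====
-- literal port of A: recursion popping the LAST separator; the two raise paths
-- (FetchTransitLinesException, IndexError on [1]) return dummies, excluded by Pre_.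
def extract_terminals (route : String) (separators : List String) : String × String :=
  if _h : separators = [] then
    let cj := "Cluj-Napoca"
    if PySem.Str.isIn cj route then
      (cj, (PySem.List.pyGet? ((PySem.Str.split? (PySem.Str.replace route cj "") "-").getD []) 1).getD "")
    else
      ("", "")  -- raise FetchTransitLinesException
  else
    -- terminal1, terminal2 = route.split(separators.pop())
    match PySem.Str.split? route (separators.getLast!) with
    | none => extract_terminals route separators.dropLast      -- ValueError: empty separator
    | some [t1, t2] => (t1, t2)
    | some _ => extract_terminals route separators.dropLast    -- ValueError: not exactly 2 values
termination_by separators.length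
decreasing_by all_goals
  · have : separators.length ≠ 0 := fun h0 => _h (List.eq_nil_of_length_eq_zero h0)
    simp [List.length_dropLast]; omega

-- ===== PORT B =====
-- the while-pop loop of Source B, as head recursion over the reversed separator list
def etAltLoop (route : String) : List String → Option (String × String)
  | [] => none
  | sep :: rest =>
    if sep = "" then etAltLoop route rest   -- `if not sep: continue`
    else
      let parts := (PySem.Str.split? route sep).getD []
      if parts.length = 2 then
        some ((PySem.List.pyGet? parts 0).getD "", (PySem.List.pyGet? parts 1).getD "")
      else etAltLoop route rest

def extract_terminals_alt (route : String) (separators : List String) : String × String :=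
  match etAltLoop route separators.reverse with
  | some p => p
  | none =>
    let cj := "Cluj-Napoca"
    if PySem.Str.isIn cj route then
      (cj, (PySem.List.pyGet? ((PySem.Str.split? (PySem.Str.replace route cj "") "-").getD []) 1).getD "")
    else
      ("", "")  -- raise FetchTransitLinesException

-- ===== PRECONDITION & SPEC =====
-- Pre_ excludes exactly the inputs where A raises: no separator splits the route into two parts
-- and the Cluj-Napoca fallback either does not apply (FetchTransitLinesException) or its
-- "-"-split has no index 1 (IndexError).
def Pre_extract_terminals (route : String) (separators : List String) : Prop :=
  (∃ s ∈ separators, ((PySem.Str.split? route s).getD []).length = 2) ∨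
  (PySem.Str.isIn "Cluj-Napoca" route = true ∧
    2 ≤ ((PySem.Str.split? (PySem.Str.replace route "Cluj-Napoca" "") "-").getD []).length)
instance (route : String) (separators : List String) : Decidable (Pre_extract_terminals route separators) := by unfold Pre_extract_terminals; infer_instance

def pvWitness_extract_terminals : String × List String := ("Gilau - Floresti", [" - "])

def Spec_extract_terminals (route : String) (separators : List String) (out : String × String) : Prop := out = extract_terminals_alt route separators
instance (route : String) (separators : List String) (out : String × String) : Decidable (Spec_extract_terminals route separators out) := by unfold Spec_extract_terminals; infer_instance

-- ===== CLAIM (what is proved, stated in full; the proofs are below) =====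
def Claim_equal_extract_terminals : Prop := ∀ (route : String) (separators : List String), Dom_extract_terminals route separators → Pre_extract_terminals route separators → Spec_extract_terminals route separators (extract_terminals route separators)

-- ===== LEMMAS AND PROOFS =====

theorem getLast!_append_singleton (xs : List String) (x : String) :
    (xs ++ [x]).getLast! = x := by
  induction xs with
  | nil => rfl
  | cons a t ih => simpa [List.getLast!] using ih

theorem str_split?_empty (r : String) : PySem.Str.split? r "" = none := by
  simp [PySem.Str.split?, PySem.Chars.split?]

theorem str_split?_isSome (r x : String) (hx : x ≠ "") : (PySem.Str.split? r x).isSome := by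
  simp [PySem.Str.split?, PySem.Chars.split?, hx]

-- The two ports agree on ALL inputs (Pre_ only marks where the Pythons return normally).
theorem extract_terminals_eq_alt (route : String) (separators : List String) :
    extract_terminals route separators = extract_terminals_alt route separators := by
  induction separators using List.reverseRecOn with
  | nil =>
    rw [extract_terminals]
    simp [extract_terminals_alt, etAltLoop]
  | append_singleton xs x ih =>
    have hne : xs ++ [x] ≠ [] := by simp
    rw [extract_terminals, dif_neg hne, getLast!_append_singleton, List.dropLast_concat]
    conv_rhs => rw [extract_terminals_alt]
    rw [List.reverse_append, List.reverse_singleton, List.singleton_append, etAltLoop]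
    by_cases hx : x = ""
    · subst hx
      rw [str_split?_empty, if_pos rfl, ih, extract_terminals_alt]
    · obtain ⟨l, hl⟩ := Option.isSome_iff_exists.mp (str_split?_isSome route x hx)
      rw [hl, if_neg hx]
      simp only [Option.getD_some]
      match l with
      | [] => rw [ih, extract_terminals_alt]; rfl
      | [a] => rw [ih, extract_terminals_alt]; rfl
      | [a, b] => simp [PySem.List.pyGet?, PySem.List.pyIdx?]
      | a :: b :: c :: t =>
        rw [ih, extract_terminals_alt]
        simp

-- ===== VERDICT (by name: the statement is the Claim_ definition above) =====
theorem extract_terminals_spec : Claim_equal_extract_terminals := by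
  intro route separators _ _
  exact extract_terminals_eq_alt route separators
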